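-- pv_equiv track=rewrite | github.com/maxmapa/prometheus01 | problem_solving/_hack_sussex/count_subtraction_cycles.py | count_subtraction_cycles
-- ===== SOURCE A (Python) =====
-- def count_subtraction_cycles(nums):
--   cycles = 0
--
--   while any(num > 0 for num in nums):
--       # Сортуємо список
--       nums.sort()
--
--       # Знаходимо найменше ненульове число
--       min_positive = next(num for num in nums if num > 0)
--
--       # Віднімаємо це число від усіх ненульових елементів
--       nums = [num - min_positive if num > 0 else num for num in nums]
--
--       # Збільшуємо кількість циклів
--       cycles += 1
--
--   return cycles
-- ===== SOURCE B (Python) =====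
-- def count_subtraction_cycles(nums):
--     # Each cycle removes exactly the smallest distinct positive value,
--     # so the number of cycles equals the number of distinct positive values.
--     # (Unlike A, this does not sort/mutate the caller's list.)
--     return len({num for num in nums if num > 0})
-- ===== Notes on version B (the rewrite author's own statement) =====
-- stated objective: faster
-- what changed: Replaced the repeated sort-and-subtract simulation with a single pass counting the distinct positive values via a set, since each cycle eliminates exactly the smallest distinct positive value.
import Mathlib
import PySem

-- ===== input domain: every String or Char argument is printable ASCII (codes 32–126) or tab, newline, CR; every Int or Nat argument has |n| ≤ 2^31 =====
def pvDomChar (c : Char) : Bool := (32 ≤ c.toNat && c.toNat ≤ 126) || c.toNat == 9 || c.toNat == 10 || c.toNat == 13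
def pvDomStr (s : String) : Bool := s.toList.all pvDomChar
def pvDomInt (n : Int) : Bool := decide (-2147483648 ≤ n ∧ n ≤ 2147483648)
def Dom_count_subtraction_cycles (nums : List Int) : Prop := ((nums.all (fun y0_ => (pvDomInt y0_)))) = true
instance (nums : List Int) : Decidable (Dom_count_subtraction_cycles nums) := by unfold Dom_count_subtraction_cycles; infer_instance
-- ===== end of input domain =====

-- B replaces A's repeated sort-and-subtract loop by a single pass counting the distinct positive
-- values via a set (asymptotically faster). A sorts the caller's list in place; B does not mutate
-- it — the equivalence proved here is about the return value only.


-- ===== PORT A =====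

-- measure for A's while loop: number of distinct positive values
def pvPosCard (nums : List Int) : Nat := ((nums.filter (fun num => decide (num > 0))).toFinset).card

-- in a ≤-sorted list, the first positive element is the minimum positive (termination helper, cited by the port)
theorem pv_find_sorted_min {s : List Int} (hp : s.Pairwise (· ≤ ·)) {m : Int}
    (hm : s.find? (fun num => decide (num > 0)) = some m) :
    m > 0 ∧ m ∈ s ∧ ∀ y ∈ s, y > 0 → m ≤ y := by
  induction s with
  | nil => simp at hm
  | cons a t ih =>
    rcases List.pairwise_cons.mp hp with ⟨ha, ht⟩
    rw [List.find?_cons] at hm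
    by_cases h0 : a > 0
    · simp only [decide_eq_true (by exact h0 : a > 0)] at hm
      cases hm
      refine ⟨h0, List.mem_cons_self, ?_⟩
      intro y hy _
      rcases List.mem_cons.mp hy with rfl | hy
      · exact le_refl y
      · exact ha y hy
    · have hd : decide (a > 0) = false := by simpa using h0
      rw [hd] at hm
      rcases ih ht hm with ⟨h1, h2, h3⟩
      refine ⟨h1, List.mem_cons_of_mem _ h2, ?_⟩
      intro y hy hy0
      rcases List.mem_cons.mp hy with rfl | hy
      · exact absurd hy0 h0
      · exact h3 y hy hy0

-- one cycle of A: the distinct positive values of the new list are the old ones except mp, shifted down by mp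
theorem pv_posFinset_step {s : List Int} {mp : Int}
    (hmin : ∀ y ∈ s, y > 0 → mp ≤ y) :
    (((s.map (fun num => if num > 0 then num - mp else num)).filter
        (fun num => decide (num > 0))).toFinset)
      = (((s.filter (fun num => decide (num > 0))).toFinset).erase mp).image (· - mp) := by
  ext x
  simp only [List.mem_toFinset, List.mem_filter, List.mem_map, Finset.mem_image,
    Finset.mem_erase, decide_eq_true_eq]
  constructor
  · rintro ⟨⟨num, hnum, rfl⟩, hx⟩
    by_cases h0 : num > 0
    · simp only [if_pos h0] at hx ⊢
      exact ⟨num, ⟨by omega, hnum, h0⟩, rfl⟩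
    · simp only [if_neg h0] at hx ⊢
      omega
  · rintro ⟨v, ⟨hne, hv, hv0⟩, rfl⟩
    have hlt : mp < v := lt_of_le_of_ne (hmin v hv hv0) (Ne.symm hne)
    exact ⟨⟨v, hv, by simp [if_pos hv0]⟩, by omega⟩

-- the loop measure strictly decreases (termination helper, cited by the port)
theorem pv_measure_dec {nums : List Int} {mp : Int}
    (hm : (PySem.List.sorted nums (fun x => x) false).find? (fun num => decide (num > 0)) = some mp) :
    pvPosCard ((PySem.List.sorted nums (fun x => x) false).map
        (fun num => if num > 0 then num - mp else num)) < pvPosCard nums := by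
  set s := PySem.List.sorted nums (fun x => x) false with hs
  have hperm : s.Perm nums := PySem.List.sorted_perm nums (fun x => x) false
  have hpw : s.Pairwise (· ≤ ·) := by
    have := PySem.List.sorted_pairwise nums (fun x => x)
    simpa [hs] using this
  rcases pv_find_sorted_min hpw hm with ⟨hmp0, hmem, hmin⟩
  have hPeq : (s.filter (fun num => decide (num > 0))).toFinset
      = (nums.filter (fun num => decide (num > 0))).toFinset := by
    ext x
    simp only [List.mem_toFinset]
    exact (hperm.filter _).mem_iff
  have hmpP : mp ∈ (s.filter (fun num => decide (num > 0))).toFinset := by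
    simp [List.mem_toFinset, hmem, hmp0]
  unfold pvPosCard
  rw [pv_posFinset_step hmin, ← hPeq]
  calc ((((s.filter (fun num => decide (num > 0))).toFinset).erase mp).image (· - mp)).card
      ≤ (((s.filter (fun num => decide (num > 0))).toFinset).erase mp).card :=
        Finset.card_image_le
    _ < ((s.filter (fun num => decide (num > 0))).toFinset).card :=
        Finset.card_erase_lt_of_mem hmpP

def count_subtraction_cycles_loop (nums : List Int) (cycles : Int) : Int :=
  if nums.any (fun num => decide (num > 0)) then
    -- nums.sort()
    let s := PySem.List.sorted nums (fun x => x) false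
    -- min_positive = next(num for num in nums if num > 0)
    match hm : s.find? (fun num => decide (num > 0)) with
    | some min_positive =>
        -- nums = [num - min_positive if num > 0 else num for num in nums]; cycles += 1
        count_subtraction_cycles_loop
          (s.map (fun num => if num > 0 then num - min_positive else num))
          (cycles + 1)
    | none => cycles  -- unreachable: the guard guarantees a positive element exists
  else
    cycles
termination_by pvPosCard nums
decreasing_by exact pv_measure_dec hm

def count_subtraction_cycles (nums : List Int) : Int :=
  count_subtraction_cycles_loop nums 0

-- ===== PORT B =====
def count_subtraction_cycles_alt (nums : List Int) : Int :=
  -- len({num for num in nums if num > 0})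
  ((PySem.Set.ofList (nums.filter (fun num => decide (num > 0)))).length : Int)

-- ===== PRECONDITION & SPEC =====
def Spec_count_subtraction_cycles (nums : List Int) (out : Int) : Prop := out = count_subtraction_cycles_alt nums
instance (nums : List Int) (out : Int) : Decidable (Spec_count_subtraction_cycles nums out) := by unfold Spec_count_subtraction_cycles; infer_instance

-- ===== CLAIM (what is proved, stated in full; the proofs are below) =====
def Claim_equal_count_subtraction_cycles : Prop := ∀ (nums : List Int), Dom_count_subtraction_cycles nums → Spec_count_subtraction_cycles nums (count_subtraction_cycles nums)

-- ===== LEMMAS AND PROOFS =====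

-- B's set size is the number of distinct positive values
theorem pv_alt_card (nums : List Int) :
    count_subtraction_cycles_alt nums = (pvPosCard nums : Int) := by
  unfold count_subtraction_cycles_alt pvPosCard
  set l := nums.filter (fun num => decide (num > 0)) with hl
  have hnd : (PySem.Set.ofList l).Nodup := PySem.Set.nodup_ofList l
  have hfs : (PySem.Set.ofList l).toFinset = l.toFinset := by
    ext x
    simp [List.mem_toFinset, PySem.Set.mem_ofList]
  have := List.toFinset_card_of_nodup hnd
  rw [← hfs, this]

-- A's loop returns cycles + the number of distinct positive values
theorem pv_loop_eq (nums : List Int) (cycles : Int) :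
    count_subtraction_cycles_loop nums cycles = cycles + (pvPosCard nums : Int) := by
  induction nums, cycles using count_subtraction_cycles_loop.induct with
  | case1 nums cycles hany s mp hm ih =>
      rw [count_subtraction_cycles_loop]
      simp only [hany, if_true]
      split
      case h_2 => next hm' => rw [hm] at hm'; exact absurd hm' (by simp)
      next mp' hm' =>
      have hmp' : mp = mp' := by rw [hm] at hm'; exact Option.some.inj hm'
      subst hmp'
      have ih' : count_subtraction_cycles_loop
          ((PySem.List.sorted nums (fun x => x) false).map
            (fun num => if num > 0 then num - mp else num)) (cycles + 1)
          = cycles + 1 + (pvPosCard ((PySem.List.sorted nums (fun x => x) false).map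
            (fun num => if num > 0 then num - mp else num)) : Int) := by
        simpa only [dite_eq_ite] using ih
      rw [ih']
      -- measure of the new list = measure of nums - 1, and nums has a positive element
      have hperm : s.Perm nums := PySem.List.sorted_perm nums (fun x => x) false
      have hpw : s.Pairwise (· ≤ ·) := by
        have := PySem.List.sorted_pairwise nums (fun x => x)
        simpa using this
      rcases pv_find_sorted_min hpw hm with ⟨hmp0, hmem, hmin⟩
      have hPeq : (s.filter (fun num => decide (num > 0))).toFinset
          = (nums.filter (fun num => decide (num > 0))).toFinset := by
        ext x
        simp only [List.mem_toFinset]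
        exact (hperm.filter _).mem_iff
      have hmpP : mp ∈ (s.filter (fun num => decide (num > 0))).toFinset := by
        simp [List.mem_toFinset, hmem, hmp0]
      have hcard : pvPosCard (s.map (fun num => if num > 0 then num - mp else num))
          = pvPosCard nums - 1 := by
        unfold pvPosCard
        rw [pv_posFinset_step hmin, ← hPeq]
        rw [Finset.card_image_of_injective _ (sub_left_injective)]
        exact Finset.card_erase_of_mem hmpP
      have hpos : 1 ≤ pvPosCard nums := by
        unfold pvPosCard
        rw [← hPeq]
        exact Finset.card_pos.mpr ⟨mp, hmpP⟩
      rw [hcard]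
      push_cast [Nat.cast_sub hpos]
      ring
  | case2 nums cycles hany s hm =>
      exfalso
      have hex : ∃ num ∈ nums, num > 0 := by simpa using hany
      rcases hex with ⟨v, hv, hv0⟩
      have hvs : v ∈ PySem.List.sorted nums (fun x => x) false :=
        ((PySem.List.sorted_perm nums (fun x => x) false).mem_iff).mpr hv
      have := List.find?_eq_none.mp hm v hvs
      simp only [decide_eq_true_eq] at this
      exact this hv0
  | case3 nums cycles hany =>
      rw [count_subtraction_cycles_loop]
      simp only [hany]
      have hfil : nums.filter (fun num => decide (num > 0)) = [] := by
        rw [List.filter_eq_nil_iff]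
        intro a ha
        by_contra h
        exact hany (List.any_eq_true.mpr ⟨a, ha, by simpa using h⟩)
      unfold pvPosCard
      rw [hfil]
      simp

-- ===== VERDICT (by name: the statement is the Claim_ definition above) =====
theorem count_subtraction_cycles_spec : Claim_equal_count_subtraction_cycles := by
  intro nums _
  unfold Spec_count_subtraction_cycles count_subtraction_cycles
  rw [pv_loop_eq, pv_alt_card]
  ring
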